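-- pv_equiv track=rewrite | github.com/TP-distribuidos/tp1-distribuidos | docker_compose_generator_files/workers/count.py | generate_worker_queue_names
-- ===== SOURCE A (Python) =====
-- def calculate_workers_per_shard(num_shards=2, num_workers_per_shard=2):
--     """
--     Calculate the distribution of count workers per shard.
--
--     Args:
--         num_shards (int): Number of shards
--         num_workers_per_shard (int): Target number of workers per shard
--
--     Returns:
--         list: List containing the number of workers for each shard
--     """
--     return [num_workers_per_shard] * num_shards
--
-- def generate_worker_queue_names(num_shards=2, num_workers_per_shard=2):
--     """
--     Generate queue names for count workers.
--
--     Args: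
--         num_shards (int): Number of shards
--         num_workers_per_shard (int): Target number of workers per shard
--
--     Returns:
--         list: List of queue names for all workers
--     """
--     workers_per_shard = calculate_workers_per_shard(num_shards, num_workers_per_shard)
--
--     queues = []
--     worker_id = 1
--
--     for shard_id, worker_count in enumerate(workers_per_shard, 1):
--         for _ in range(worker_count):
--             queues.append(f"count_worker_{worker_id}")
--             worker_id += 1
--
--     return queues
-- ===== SOURCE B (Python) =====
-- def generate_worker_queue_names(num_shards=2, num_workers_per_shard=2):
--     n = max(num_shards, 0) * max(num_workers_per_shard, 0)
--     return [f"count_worker_{i}" for i in range(1, n + 1)]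
-- ===== Notes on version B (the rewrite author's own statement) =====
-- stated objective: simpler
-- what changed: Replaced the helper-built per-shard list, nested loops and hand-threaded worker_id counter with a closed-form total max(num_shards,0)*max(num_workers_per_shard,0) and one flat comprehension over range(1, n+1).
import Mathlib
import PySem

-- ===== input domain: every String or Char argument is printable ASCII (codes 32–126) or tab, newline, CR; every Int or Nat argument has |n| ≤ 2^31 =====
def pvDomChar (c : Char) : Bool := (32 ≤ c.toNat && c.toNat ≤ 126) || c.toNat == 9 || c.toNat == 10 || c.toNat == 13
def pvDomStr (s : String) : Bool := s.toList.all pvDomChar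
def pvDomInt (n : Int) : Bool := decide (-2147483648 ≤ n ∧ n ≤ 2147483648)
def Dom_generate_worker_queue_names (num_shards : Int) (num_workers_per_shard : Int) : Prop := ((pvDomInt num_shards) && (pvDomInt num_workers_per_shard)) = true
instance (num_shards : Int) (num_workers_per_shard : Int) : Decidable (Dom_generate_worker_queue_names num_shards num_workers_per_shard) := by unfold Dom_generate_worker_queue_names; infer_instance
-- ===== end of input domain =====

-- ===== PORT A =====
def generate_worker_queue_names (num_shards : Int) (num_workers_per_shard : Int) : List String :=
  let workers_per_shard := List.replicate num_shards.toNat num_workers_per_shard  -- [w] * s (empty for s ≤ 0)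
  (workers_per_shard.foldl
    (fun (st : List String × Int) worker_count =>
      (PySem.List.pyRange 0 worker_count 1).foldl
        (fun (st : List String × Int) _ =>
          (st.1 ++ ["count_worker_" ++ PySem.Int.toStr st.2], st.2 + 1)) st)
    ([], 1)).1

-- ===== PORT B =====
def generate_worker_queue_names_alt (num_shards : Int) (num_workers_per_shard : Int) : List String :=
  let n : Int := max num_shards 0 * max num_workers_per_shard 0
  (PySem.List.pyRange 1 (n + 1) 1).map (fun i => "count_worker_" ++ PySem.Int.toStr i)

-- ===== PRECONDITION & SPEC =====
def Spec_generate_worker_queue_names (num_shards : Int) (num_workers_per_shard : Int) (out : List String) : Prop := out = generate_worker_queue_names_alt num_shards num_workers_per_shard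
instance (num_shards : Int) (num_workers_per_shard : Int) (out : List String) : Decidable (Spec_generate_worker_queue_names num_shards num_workers_per_shard out) := by unfold Spec_generate_worker_queue_names; infer_instance

-- ===== CLAIM (what is proved, stated in full; the proofs are below) =====
def Claim_equal_generate_worker_queue_names : Prop := ∀ (num_shards : Int) (num_workers_per_shard : Int), Dom_generate_worker_queue_names num_shards num_workers_per_shard → Spec_generate_worker_queue_names num_shards num_workers_per_shard (generate_worker_queue_names num_shards num_workers_per_shard)

-- ===== LEMMAS AND PROOFS =====

-- ===== VERDICT (by name: the statement is the Claim_ definition above) =====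
lemma pv_fold_const {α : Type} (l : List α) (acc : List String) (id : Int) :
    l.foldl (fun (st : List String × Int) _ =>
        (st.1 ++ ["count_worker_" ++ PySem.Int.toStr st.2], st.2 + 1)) (acc, id)
    = (acc ++ (List.range l.length).map (fun (k : Nat) => "count_worker_" ++ PySem.Int.toStr (id + (k : Int))),
       id + l.length) := by
  induction l generalizing acc id with
  | nil => simp
  | cons x xs ih =>
      simp only [List.foldl_cons, ih, List.length_cons]
      simp only [Prod.mk.injEq]
      constructor
      · rw [List.range_succ_eq_map]
        simp only [List.map_cons, List.map_map, List.append_assoc, List.singleton_append]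
        congr 2
        · simp
        · apply List.map_congr_left
          intro k _
          simp only [Function.comp_apply]
          have h : id + 1 + (k : Int) = id + ((Nat.succ k : Nat) : Int) := by push_cast; ring
          rw [h]
      · push_cast; ring

lemma pv_outer (c : Nat) (w : Int) (acc : List String) (id : Int) :
    (List.replicate c w).foldl
      (fun (st : List String × Int) worker_count =>
        (PySem.List.pyRange 0 worker_count 1).foldl
          (fun (st : List String × Int) _ =>
            (st.1 ++ ["count_worker_" ++ PySem.Int.toStr st.2], st.2 + 1)) st) (acc, id)
    = (acc ++ (List.range (c * w.toNat)).map (fun (k : Nat) => "count_worker_" ++ PySem.Int.toStr (id + (k : Int))),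
       id + c * w.toNat) := by
  induction c generalizing acc id with
  | zero => simp
  | succ c ih =>
      rw [List.replicate_succ, List.foldl_cons, pv_fold_const, ih]
      have hlen : (PySem.List.pyRange 0 w 1).length = w.toNat := by
        rw [PySem.List.length_pyRange_one]; omega
      rw [hlen]
      have hsplit : (c + 1) * w.toNat = w.toNat + c * w.toNat := by ring
      simp only [Prod.mk.injEq]
      constructor
      · rw [hsplit, List.range_add]
        simp only [List.map_append, List.map_map, List.append_assoc]
        congr 2
        apply List.map_congr_left
        intro k _
        simp only [Function.comp_apply]
        have h : id + (w.toNat : Int) + (k : Int) = id + ((w.toNat + k : Nat) : Int) := by push_cast; ring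
        rw [h]
      · push_cast; ring

theorem generate_worker_queue_names_spec : Claim_equal_generate_worker_queue_names := by
  intro s w _
  unfold Spec_generate_worker_queue_names generate_worker_queue_names generate_worker_queue_names_alt
  dsimp only
  rw [pv_outer]
  rw [PySem.List.pyRange_one]
  have hn : (max s 0 * max w 0 + 1 - 1).toNat = s.toNat * w.toNat := by
    rw [← Int.ofNat_toNat s, ← Int.ofNat_toNat w]
    omega
  rw [hn]
  simp only [List.nil_append, List.map_map]
  apply List.map_congr_left
  intro k _
  simp only [Function.comp_apply]
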